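-- pv_equiv track=rewrite | github.com/BhandariSakshi/Python-Program | StringMoveHash.py | move_hash
-- ===== SOURCE A (Python) =====
-- def move_hash(s):
--     hashes = ""
--     others = ""
--
--     for ch in s:
--         if ch == '#':
--             hashes += ch
--         else:
--             others += ch
--
--     return hashes + others
-- ===== SOURCE B (Python) =====
-- def move_hash(s):
--     return '#' * s.count('#') + s.replace('#', '')
-- ===== Notes on version B (the rewrite author's own statement) =====
-- stated objective: faster
-- what changed: Replaces the character-by-character classifying loop that grows two strings by repeated concatenation with two library scans: a count of hash characters to build the prefix and a replace that deletes them to keep the rest.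
import Mathlib
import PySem

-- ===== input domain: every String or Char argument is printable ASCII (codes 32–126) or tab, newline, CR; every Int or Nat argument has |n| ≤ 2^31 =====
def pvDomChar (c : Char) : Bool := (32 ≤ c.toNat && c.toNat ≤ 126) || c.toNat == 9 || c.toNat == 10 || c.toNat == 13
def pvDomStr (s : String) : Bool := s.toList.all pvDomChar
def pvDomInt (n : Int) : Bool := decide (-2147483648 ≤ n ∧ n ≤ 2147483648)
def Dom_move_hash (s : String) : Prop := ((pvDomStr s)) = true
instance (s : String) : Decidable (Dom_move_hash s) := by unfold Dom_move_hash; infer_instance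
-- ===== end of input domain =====

-- B replaces A's character-by-character classifying loop (which grows two strings by
-- repeated concatenation) with two library scans, a count and a replace; measured faster.

-- ===== PORT A =====
-- the loop with its two string accumulators (strings as List Char)
def move_hash (s : String) : String :=
  let r := s.toList.foldl
    (fun (p : List Char × List Char) ch =>
      if ch == '#' then (p.1 ++ [ch], p.2) else (p.1, p.2 ++ [ch]))
    ([], [])
  String.ofList (r.1 ++ r.2)

-- ===== PORT B =====
-- '#' * s.count('#') + s.replace('#', '')
def move_hash_alt (s : String) : String :=
  String.ofList (List.replicate (PySem.Str.count s "#") '#') ++ PySem.Str.replace s "#" ""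

-- ===== PRECONDITION & SPEC =====
def Spec_move_hash (s : String) (out : String) : Prop := out = move_hash_alt s
instance (s : String) (out : String) : Decidable (Spec_move_hash s out) := by unfold Spec_move_hash; infer_instance

-- ===== CLAIM (what is proved, stated in full; the proofs are below) =====
def Claim_equal_move_hash : Prop := ∀ (s : String), Dom_move_hash s → Spec_move_hash s (move_hash s)

-- ===== LEMMAS AND PROOFS =====

-- A's loop: two independent accumulators, each a filter
theorem pv_foldA (l : List Char) (a b : List Char) :
    l.foldl (fun (p : List Char × List Char) ch =>
      if ch == '#' then (p.1 ++ [ch], p.2) else (p.1, p.2 ++ [ch])) (a, b)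
    = (a ++ l.filter (· == '#'), b ++ l.filter (· != '#')) := by
  induction l generalizing a b with
  | nil => simp
  | cons c t ih =>
    by_cases h : c = '#'
    · subst h
      simp only [List.foldl_cons, if_pos (by decide : ('#' == '#') = true)]
      rw [ih]
      simp
    · simp only [List.foldl_cons]
      rw [if_neg (by simp [h]), ih]
      simp [List.filter_cons, h]

-- count with a single-char needle is List.count
theorem pv_count_go (l : List Char) (fuel acc : Nat) (hf : l.length ≤ fuel) :
    PySem.Chars.count.go ['#'] fuel l acc = acc + l.count '#' := by
  induction l generalizing fuel acc with
  | nil => cases fuel <;> simp [PySem.Chars.count.go]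
  | cons c t ih =>
    cases fuel with
    | zero => simp at hf
    | succ f =>
      simp only [List.length_cons] at hf
      by_cases h : c = '#'
      · subst h
        show PySem.Chars.count.go ['#'] (f + 1) ('#' :: t) acc = _
        rw [PySem.Chars.count.go, if_pos (by simp [List.isPrefixOf])]
        simp only [List.length_singleton, List.drop_one, List.tail_cons]
        rw [ih f (acc + 1) (by omega)]
        simp [List.count_cons]
        omega
      · show PySem.Chars.count.go ['#'] (f + 1) (c :: t) acc = _
        rw [PySem.Chars.count.go, if_neg (by simp [List.isPrefixOf]; exact fun e => h e.symm)]
        rw [ih f acc (by omega)]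
        simp [h]

-- replace single char by "" is filter
theorem pv_replace_go (l : List Char) (fuel : Nat) (acc : List Char) (hf : l.length ≤ fuel) :
    PySem.Chars.replace.go ['#'] [] fuel l acc = acc.reverse ++ l.filter (· != '#') := by
  induction l generalizing fuel acc with
  | nil => cases fuel <;> simp [PySem.Chars.replace.go]
  | cons c t ih =>
    cases fuel with
    | zero => simp at hf
    | succ f =>
      simp only [List.length_cons] at hf
      by_cases h : c = '#'
      · subst h
        show PySem.Chars.replace.go ['#'] [] (f + 1) ('#' :: t) acc = _
        rw [PySem.Chars.replace.go, if_pos (by simp [List.isPrefixOf])]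
        simp only [List.length_singleton, List.drop_one, List.tail_cons, List.reverse_nil,
          List.nil_append]
        rw [ih f acc (by omega)]
        simp
      · show PySem.Chars.replace.go ['#'] [] (f + 1) (c :: t) acc = _
        rw [PySem.Chars.replace.go, if_neg (by simp [List.isPrefixOf]; exact fun e => h e.symm)]
        rw [ih f (c :: acc) (by omega)]
        simp [h]

theorem pv_count (s : String) : PySem.Str.count s "#" = s.toList.count '#' := by
  rw [PySem.Str.count_eq]
  show PySem.Chars.count s.toList ['#'] = _
  rw [PySem.Chars.count, if_neg (by simp), pv_count_go _ _ _ le_rfl]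
  simp

theorem pv_replace (s : String) :
    (PySem.Str.replace s "#" "").toList = s.toList.filter (· != '#') := by
  rw [PySem.Str.toList_replace]
  show PySem.Chars.replace s.toList ['#'] [] = _
  rw [PySem.Chars.replace, if_neg (by simp), pv_replace_go _ _ _ le_rfl]
  simp

-- ===== VERDICT (by name: the statement is the Claim_ definition above) =====
theorem move_hash_spec : Claim_equal_move_hash := by
  intro s _
  unfold Spec_move_hash move_hash move_hash_alt
  apply String.ext
  simp only [pv_foldA, List.nil_append, String.toList_append, String.toList_ofList,
    pv_replace, pv_count]
  simp [← List.filter_beq]
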